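-- pv_equiv track=rewrite | github.com/Lepre-CHAU-n/Yet-Another-Image-Processor | cmpt120imageManip.py | greenBox
-- ===== SOURCE A (Python) =====
-- def greenBox(rowList, colList, pixels):
--     maxRow = max(rowList)
--     minRow = min(rowList)
--     maxCol = max(colList)
--     minCol = min(colList)
--
--     # Green Pixel: to replace pixels from img to a green pixel
--     greenPixel = [0, 255, 0]
--
--     # To indicate that the black image canvas is the pixels value
--     canvas = pixels
--
--     # Visual Example of how row & col ranges were chosen:
--     #                minCol:       :maxCol
--     #            (left side)       (right side)
--     #                       0 1 2 3
--     #   minRow:(top side)  0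
--     #                      1
--     #                      2
--     # maxRow:(bottom side) 3
--
--     # LEFT side (minimum value of columns)
--     for row in range(minRow, maxRow + 1):
--         for col in range(minCol, minCol + 1, 1):
--             canvas[row][col] = greenPixel
--
--     # RIGHT side (maximum value of columns)
--     for row in range(minRow, maxRow + 1):
--         for col in range(maxCol, maxCol + 1, 1):
--             canvas[row][col] = greenPixel
--
--     # TOP side (minimum value of rows)
--     for row in range(minRow, minRow + 1):
--         for col in range(minCol, maxCol + 1, 1):
--             canvas[row][col] = greenPixel
--
--     # BOTTOM side (maximum value of rows)
--     for row in range(maxRow, maxRow + 1):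
--         for col in range(minCol, maxCol + 1, 1):
--             canvas[row][col] = greenPixel
--
--     return canvas
-- ===== SOURCE B (Python) =====
-- def greenBox(rowList, colList, pixels):
--     maxRow = max(rowList)
--     minRow = min(rowList)
--     maxCol = max(colList)
--     minCol = min(colList)
--     greenPixel = [0, 255, 0]
--     for row in range(minRow, maxRow + 1):
--         for col in range(minCol, maxCol + 1):
--             if row == minRow or row == maxRow or col == minCol or col == maxCol:
--                 pixels[row][col] = greenPixel
--     return pixels
-- ===== Notes on version B (the rewrite author's own statement) =====
-- stated objective: simpler
-- what changed: A's four separate perimeter sweeps (left column, right column, top row, bottom row) are replaced by one nested scan of the bounding box that paints a cell exactly when it lies on the border.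
import Mathlib
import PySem

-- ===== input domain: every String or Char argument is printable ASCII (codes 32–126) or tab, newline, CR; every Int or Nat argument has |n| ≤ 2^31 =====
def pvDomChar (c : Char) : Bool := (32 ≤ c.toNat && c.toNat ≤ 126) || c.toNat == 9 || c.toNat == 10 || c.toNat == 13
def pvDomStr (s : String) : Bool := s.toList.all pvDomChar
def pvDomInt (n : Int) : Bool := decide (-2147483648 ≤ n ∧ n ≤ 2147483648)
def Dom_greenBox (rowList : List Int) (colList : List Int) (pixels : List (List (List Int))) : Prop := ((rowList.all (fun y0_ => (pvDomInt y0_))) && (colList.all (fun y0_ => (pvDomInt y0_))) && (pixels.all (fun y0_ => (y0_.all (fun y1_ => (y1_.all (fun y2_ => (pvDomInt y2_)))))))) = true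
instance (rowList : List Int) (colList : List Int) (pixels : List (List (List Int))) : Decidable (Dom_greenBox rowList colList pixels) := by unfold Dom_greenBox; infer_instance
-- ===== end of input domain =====

-- B draws the green border with ONE bounding-box scan gated by a border test instead of A's
-- four perimeter sweeps (not faster, just shorter). Both Pythons mutate `pixels` in place;
-- the equivalence proved here is about the return value.

-- `canvas[row][col] = greenPixel` under Python index semantics (Pre_ keeps every index in range)
def pvSetPix (g : List (List (List Int))) (r c : Int) : List (List (List Int)) :=
  PySem.List.pySetD g r (PySem.List.pySetD (PySem.List.pyGetD g r []) c [0, 255, 0])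

-- ===== PORT A =====
def greenBox (rowList : List Int) (colList : List Int) (pixels : List (List (List Int))) : List (List (List Int)) :=
  let maxRow := (PySem.List.max? rowList id).getD 0
  let minRow := (PySem.List.min? rowList id).getD 0
  let maxCol := (PySem.List.max? colList id).getD 0
  let minCol := (PySem.List.min? colList id).getD 0
  let canvas := pixels
  let canvas := (PySem.List.pyRange minRow (maxRow + 1) 1).foldl (fun g row =>
    (PySem.List.pyRange minCol (minCol + 1) 1).foldl (fun g col => pvSetPix g row col) g) canvas
  let canvas := (PySem.List.pyRange minRow (maxRow + 1) 1).foldl (fun g row =>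
    (PySem.List.pyRange maxCol (maxCol + 1) 1).foldl (fun g col => pvSetPix g row col) g) canvas
  let canvas := (PySem.List.pyRange minRow (minRow + 1) 1).foldl (fun g row =>
    (PySem.List.pyRange minCol (maxCol + 1) 1).foldl (fun g col => pvSetPix g row col) g) canvas
  let canvas := (PySem.List.pyRange maxRow (maxRow + 1) 1).foldl (fun g row =>
    (PySem.List.pyRange minCol (maxCol + 1) 1).foldl (fun g col => pvSetPix g row col) g) canvas
  canvas

-- ===== PORT B =====
def greenBox_alt (rowList : List Int) (colList : List Int) (pixels : List (List (List Int))) : List (List (List Int)) :=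
  let maxRow := (PySem.List.max? rowList id).getD 0
  let minRow := (PySem.List.min? rowList id).getD 0
  let maxCol := (PySem.List.max? colList id).getD 0
  let minCol := (PySem.List.min? colList id).getD 0
  (PySem.List.pyRange minRow (maxRow + 1) 1).foldl (fun g row =>
    (PySem.List.pyRange minCol (maxCol + 1) 1).foldl (fun g col =>
      if row == minRow || row == maxRow || col == minCol || col == maxCol then
        pvSetPix g row col
      else g) g) pixels

-- ===== PRECONDITION & SPEC =====
-- Pre_ excludes exactly the inputs on which Python A raises: an empty coordinate list
-- (ValueError from max()/min()) or a coordinate that falls outside the image (IndexError):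
-- every listed row index must address a row of `pixels`, and on every row spanned by the
-- row window every listed column index must address a pixel of that row.
def Pre_greenBox (rowList : List Int) (colList : List Int) (pixels : List (List (List Int))) : Prop :=
  rowList ≠ [] ∧ colList ≠ [] ∧
  (∀ r ∈ rowList, PySem.Raise.InRange pixels.length r) ∧
  (∀ r ∈ PySem.List.pyRange ((PySem.List.min? rowList id).getD 0) (((PySem.List.max? rowList id).getD 0) + 1) 1,
    ∀ c ∈ colList, PySem.Raise.InRange (PySem.List.pyGetD pixels r []).length c)
instance (rowList : List Int) (colList : List Int) (pixels : List (List (List Int))) : Decidable (Pre_greenBox rowList colList pixels) := by unfold Pre_greenBox; infer_instance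

def pvWitness_greenBox : List Int × List Int × List (List (List Int)) :=
  ([0, 2], [0, 2],
   [[[1, 1, 1], [1, 1, 1], [1, 1, 1]],
    [[1, 1, 1], [1, 1, 1], [1, 1, 1]],
    [[1, 1, 1], [1, 1, 1], [1, 1, 1]]])

def Spec_greenBox (rowList : List Int) (colList : List Int) (pixels : List (List (List Int))) (out : List (List (List Int))) : Prop := out = greenBox_alt rowList colList pixels
instance (rowList : List Int) (colList : List Int) (pixels : List (List (List Int))) (out : List (List (List Int))) : Decidable (Spec_greenBox rowList colList pixels out) := by unfold Spec_greenBox; infer_instance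

-- ===== CLAIM (what is proved, stated in full; the proofs are below) =====
def Claim_equal_greenBox : Prop := ∀ (rowList : List Int) (colList : List Int) (pixels : List (List (List Int))), Dom_greenBox rowList colList pixels → Pre_greenBox rowList colList pixels → Spec_greenBox rowList colList pixels (greenBox rowList colList pixels)

-- ===== LEMMAS AND PROOFS =====

lemma pyIdx?_lt {n : Nat} {i : Int} {k : Nat} (h : PySem.List.pyIdx? n i = some k) : k < n := by
  unfold PySem.List.pyIdx? at h
  split_ifs at h <;> simp_all <;> omega

lemma pySetD_idx_none {α : Type} {xs : List α} {i : Int} {v : α}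
    (h : PySem.List.pyIdx? xs.length i = none) : PySem.List.pySetD xs i v = xs := by
  simp [PySem.List.pySetD, PySem.List.pySet?, h]

lemma pySetD_idx_some {α : Type} {xs : List α} {i : Int} {k : Nat} {v : α}
    (h : PySem.List.pyIdx? xs.length i = some k) : PySem.List.pySetD xs i v = xs.set k v := by
  simp [PySem.List.pySetD, PySem.List.pySet?, h]

lemma pvSetPix_none {g : List (List (List Int))} {r : Int} (c : Int)
    (h : PySem.List.pyIdx? g.length r = none) : pvSetPix g r c = g := by
  unfold pvSetPix
  exact pySetD_idx_none h

lemma pvSetPix_some {g : List (List (List Int))} {r : Int} {n : Nat} (c : Int)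
    (h : PySem.List.pyIdx? g.length r = some n) :
    pvSetPix g r c = g.set n (PySem.List.pySetD (g[n]?.getD []) c [0, 255, 0]) := by
  unfold pvSetPix
  rw [pySetD_idx_some h]
  congr 2
  simp [PySem.List.pyGetD, PySem.List.pyGet?, h]

lemma length_pvSetPix (g : List (List (List Int))) (r c : Int) :
    (pvSetPix g r c).length = g.length := by
  unfold pvSetPix; exact PySem.List.length_pySetD _ _ _

lemma pySetD_same_comm {α : Type} (xs : List α) (i j : Int) (v : α) :
    PySem.List.pySetD (PySem.List.pySetD xs i v) j v
      = PySem.List.pySetD (PySem.List.pySetD xs j v) i v := by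
  rcases hi : PySem.List.pyIdx? xs.length i with _ | k <;>
  rcases hj : PySem.List.pyIdx? xs.length j with _ | m
  · simp [pySetD_idx_none hi, pySetD_idx_none hj]
  · have hj' := pySetD_idx_some (xs := xs) (v := v) hj
    have hlen : (xs.set m v).length = xs.length := by simp
    simp [pySetD_idx_none hi, hj', pySetD_idx_none (hlen ▸ hi : PySem.List.pyIdx? (xs.set m v).length i = none)]
  · have hi' := pySetD_idx_some (xs := xs) (v := v) hi
    have hlen : (xs.set k v).length = xs.length := by simp
    simp [pySetD_idx_none hj, hi', pySetD_idx_none (hlen ▸ hj : PySem.List.pyIdx? (xs.set k v).length j = none)]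
  · have hlk : (xs.set k v).length = xs.length := by simp
    have hlm : (xs.set m v).length = xs.length := by simp
    rw [pySetD_idx_some hi, pySetD_idx_some hj,
        pySetD_idx_some (hlk ▸ hj : PySem.List.pyIdx? (xs.set k v).length j = some m),
        pySetD_idx_some (hlm ▸ hi : PySem.List.pyIdx? (xs.set m v).length i = some k)]
    by_cases hkm : k = m
    · subst hkm; rw [List.set_set]
    · exact List.set_comm _ _ hkm

lemma pySetD_same_idem {α : Type} (xs : List α) (i : Int) (v : α) :
    PySem.List.pySetD (PySem.List.pySetD xs i v) i v = PySem.List.pySetD xs i v := by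
  rcases hi : PySem.List.pyIdx? xs.length i with _ | k
  · simp [pySetD_idx_none hi]
  · have hlk : (xs.set k v).length = xs.length := by simp
    rw [pySetD_idx_some hi,
        pySetD_idx_some (hlk ▸ hi : PySem.List.pyIdx? (xs.set k v).length i = some k),
        List.set_set]

lemma pvSetPix_comm (g : List (List (List Int))) (r c r' c' : Int) :
    pvSetPix (pvSetPix g r c) r' c' = pvSetPix (pvSetPix g r' c') r c := by
  rcases h1 : PySem.List.pyIdx? g.length r with _ | n
  · rw [pvSetPix_none c h1, pvSetPix_none c (by rw [length_pvSetPix]; exact h1)]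
  · rcases h2 : PySem.List.pyIdx? g.length r' with _ | m
    · rw [pvSetPix_none c' h2, pvSetPix_none c' (by rw [length_pvSetPix]; exact h2)]
    · have hn := pyIdx?_lt h1
      have hm := pyIdx?_lt h2
      rw [pvSetPix_some c h1, pvSetPix_some c' h2,
          pvSetPix_some c' (show PySem.List.pyIdx? (g.set n _).length r' = some m by rw [List.length_set]; exact h2),
          pvSetPix_some c (show PySem.List.pyIdx? (g.set m _).length r = some n by rw [List.length_set]; exact h1)]
      by_cases hnm : n = m
      · subst hnm
        rw [List.set_set, List.set_set,
            List.getElem?_set_self hn, List.getElem?_set_self hn]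
        simp only [Option.getD_some]
        rw [pySetD_same_comm]
      · rw [List.getElem?_set_ne hnm, List.getElem?_set_ne (Ne.symm hnm)]
        exact List.set_comm _ _ hnm

lemma pvSetPix_idem (g : List (List (List Int))) (r c : Int) :
    pvSetPix (pvSetPix g r c) r c = pvSetPix g r c := by
  rcases h1 : PySem.List.pyIdx? g.length r with _ | n
  · rw [pvSetPix_none c (by rw [length_pvSetPix]; exact h1)]
  · have hn := pyIdx?_lt h1
    rw [pvSetPix_some c h1,
        pvSetPix_some c (show PySem.List.pyIdx? (g.set n _).length r = some n by rw [List.length_set]; exact h1),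
        List.set_set, List.getElem?_set_self hn]
    simp only [Option.getD_some]
    rw [pySetD_same_idem]

def pvOp (g : List (List (List Int))) (p : Int × Int) : List (List (List Int)) := pvSetPix g p.1 p.2

lemma foldl_absorb {α β : Type} (op : β → α → β)
    (hc : ∀ b a1 a2, op (op b a1) a2 = op (op b a2) a1)
    (hi : ∀ b a, op (op b a) a = op b a)
    {L : List α} {x : α} (hx : x ∈ L) (init : β) :
    L.foldl op (op init x) = L.foldl op init := by
  induction L generalizing init with
  | nil => simp at hx
  | cons y t ih =>
    rcases List.mem_cons.1 hx with h | h
    · subst h; simp only [List.foldl_cons, hi]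
    · simp only [List.foldl_cons]
      rw [hc init x y]
      exact ih h _

lemma foldl_dedup {α β : Type} [DecidableEq α] (op : β → α → β)
    (hc : ∀ b a1 a2, op (op b a1) a2 = op (op b a2) a1)
    (hi : ∀ b a, op (op b a) a = op b a)
    (L : List α) (init : β) :
    L.foldl op init = L.dedup.foldl op init := by
  induction L generalizing init with
  | nil => simp
  | cons y t ih =>
    by_cases hy : y ∈ t
    · rw [List.dedup_cons_of_mem hy, List.foldl_cons, foldl_absorb op hc hi hy, ih]
    · rw [List.dedup_cons_of_notMem hy, List.foldl_cons, List.foldl_cons, ih]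

lemma foldl_eq_of_mem_iff {α β : Type} [DecidableEq α] (op : β → α → β)
    (hc : ∀ b a1 a2, op (op b a1) a2 = op (op b a2) a1)
    (hi : ∀ b a, op (op b a) a = op b a)
    {L1 L2 : List α} (h : ∀ x, x ∈ L1 ↔ x ∈ L2) (init : β) :
    L1.foldl op init = L2.foldl op init := by
  rw [foldl_dedup op hc hi L1, foldl_dedup op hc hi L2]
  exact @List.Perm.foldl_eq _ _ op _ _ ⟨fun b a1 a2 => hc b a1 a2⟩
    ((List.perm_ext_iff_of_nodup (List.nodup_dedup _) (List.nodup_dedup _)).2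
      (by simp [h])) init

lemma foldl_if_filter {α β : Type} (p : α → Bool) (f : β → α → β) (L : List α) (init : β) :
    L.foldl (fun b a => if p a then f b a else b) init = (L.filter p).foldl f init := by
  induction L generalizing init with
  | nil => simp
  | cons y t ih =>
    by_cases hy : p y <;> simp [hy, ih]

def pvRows (lo hi : Int) : List Int := PySem.List.pyRange lo (hi + 1) 1

def pvCoordsA (mr Mr mc Mc : Int) : List (Int × Int) :=
  (pvRows mr Mr).map (fun r => (r, mc)) ++ (pvRows mr Mr).map (fun r => (r, Mc))
    ++ (pvRows mc Mc).map (fun c => (mr, c)) ++ (pvRows mc Mc).map (fun c => (Mr, c))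

def pvCoordsB (mr Mr mc Mc : Int) : List (Int × Int) :=
  (pvRows mr Mr).flatMap (fun r =>
    ((pvRows mc Mc).filter (fun c => r == mr || r == Mr || c == mc || c == Mc)).map (fun c => (r, c)))

lemma mem_coordsAB {mr Mr mc Mc : Int} (hr : mr ≤ Mr) (hc : mc ≤ Mc) (p : Int × Int) :
    p ∈ pvCoordsA mr Mr mc Mc ↔ p ∈ pvCoordsB mr Mr mc Mc := by
  obtain ⟨a, b⟩ := p
  simp [pvCoordsA, pvCoordsB, pvRows, PySem.List.mem_pyRange_one, List.mem_filter]
  constructor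
  · intro h
    omega
  · intro h
    omega

lemma greenBox_eq_foldl (rowList colList : List Int) (pixels : List (List (List Int))) :
    greenBox rowList colList pixels =
      (pvCoordsA ((PySem.List.min? rowList id).getD 0) ((PySem.List.max? rowList id).getD 0)
        ((PySem.List.min? colList id).getD 0) ((PySem.List.max? colList id).getD 0)).foldl pvOp pixels := by
  simp [greenBox, pvCoordsA, pvRows, pvOp, List.foldl_append, List.foldl_map,
    PySem.List.pyRange_one_singleton]

lemma greenBox_alt_eq_foldl (rowList colList : List Int) (pixels : List (List (List Int))) :
    greenBox_alt rowList colList pixels =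
      (pvCoordsB ((PySem.List.min? rowList id).getD 0) ((PySem.List.max? rowList id).getD 0)
        ((PySem.List.min? colList id).getD 0) ((PySem.List.max? colList id).getD 0)).foldl pvOp pixels := by
  simp only [greenBox_alt, pvCoordsB, pvRows, pvOp, List.foldl_flatMap, List.foldl_map,
    foldl_if_filter]

lemma pv_min_le_max {xs : List Int} (h : xs ≠ []) :
    (PySem.List.min? xs id).getD 0 ≤ (PySem.List.max? xs id).getD 0 := by
  rcases h1 : PySem.List.max? xs id with _ | M
  · exact absurd ((PySem.List.max?_eq_none_iff xs id).1 h1) h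
  · rcases h2 : PySem.List.min? xs id with _ | m
    · exact absurd ((PySem.List.min?_eq_none_iff xs id).1 h2) h
    · simpa using PySem.List.min?_isMin h2 M (PySem.List.max?_mem h1)

lemma pv_main (rowList colList : List Int) (pixels : List (List (List Int)))
    (hr : rowList ≠ []) (hc : colList ≠ []) :
    greenBox rowList colList pixels = greenBox_alt rowList colList pixels := by
  rw [greenBox_eq_foldl, greenBox_alt_eq_foldl]
  exact foldl_eq_of_mem_iff pvOp
    (fun b a1 a2 => pvSetPix_comm b a1.1 a1.2 a2.1 a2.2)
    (fun b a => pvSetPix_idem b a.1 a.2)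
    (mem_coordsAB (pv_min_le_max hr) (pv_min_le_max hc)) pixels

-- ===== VERDICT (by name: the statement is the Claim_ definition above) =====
theorem greenBox_spec : Claim_equal_greenBox := by
  intro rowList colList pixels _ hpre
  unfold Spec_greenBox
  exact pv_main rowList colList pixels hpre.1 hpre.2.1
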